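-- pv_equiv track=rewrite | github.com/umich-db/LakeHelm | processors/trino_feature_embedding.py | combine_configs
-- ===== SOURCE A (Python) =====
-- def combine_configs(engine_configs, datalake_configs):
--     """
--     将引擎配置和数据湖配置拼接成完整的配置。
--
--     Args:
--         engine_configs: 引擎配置列表，每个元素是一个配置组列表
--         datalake_configs: 数据湖配置列表，每个元素是一个配置组列表
--
--     Returns:
--         完整配置列表，每个元素是引擎配置+数据湖配置的拼接
--     """
--     if not engine_configs and not datalake_configs:
--         return []
--
--     # 确保两个配置列表长度一致
--     max_len = max(len(engine_configs) if engine_configs else 0,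
--                   len(datalake_configs) if datalake_configs else 0)
--
--     combined_configs = []
--     for i in range(max_len):
--         # 获取当前索引的引擎配置，如果超出范围则使用最后一个或空列表
--         if engine_configs:
--             if i < len(engine_configs):
--                 engine_config = engine_configs[i]
--             else:
--                 engine_config = engine_configs[-1]  # 使用最后一个配置
--         else:
--             engine_config = []
--
--         # 获取当前索引的数据湖配置，如果超出范围则使用最后一个或空列表
--         if datalake_configs:
--             if i < len(datalake_configs):
--                 datalake_config = datalake_configs[i]
--             else:
--                 datalake_config = datalake_configs[-1]  # 使用最后一个配置
--         else:
--             datalake_config = []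
--
--         # 拼接配置
--         combined_config = list(engine_config) + list(datalake_config)
--         combined_configs.append(combined_config)
--
--     return combined_configs
-- ===== SOURCE B (Python) =====
-- def combine_configs(engine_configs, datalake_configs):
--     # Consume both lists simultaneously from the front, carrying the last
--     # element seen on each side; an exhausted side keeps emitting its carry.
--     es = list(reversed(engine_configs)) if engine_configs else []
--     ds = list(reversed(datalake_configs)) if datalake_configs else []
--     e, d, out = [], [], []
--     while es or ds:
--         if es:
--             e = es.pop()
--         if ds:
--             d = ds.pop()
--         out.append(list(e) + list(d))
--     return out
-- ===== Notes on version B (the rewrite author's own statement) =====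
-- stated objective: alternative
-- what changed: Replaces A's index loop over range(max_len) with per-index bounds/emptiness branching by a single simultaneous front-to-back consumption of both lists that carries the last element seen on each side, so no max_len, no indexing and no padding exist in B.
import Mathlib
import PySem

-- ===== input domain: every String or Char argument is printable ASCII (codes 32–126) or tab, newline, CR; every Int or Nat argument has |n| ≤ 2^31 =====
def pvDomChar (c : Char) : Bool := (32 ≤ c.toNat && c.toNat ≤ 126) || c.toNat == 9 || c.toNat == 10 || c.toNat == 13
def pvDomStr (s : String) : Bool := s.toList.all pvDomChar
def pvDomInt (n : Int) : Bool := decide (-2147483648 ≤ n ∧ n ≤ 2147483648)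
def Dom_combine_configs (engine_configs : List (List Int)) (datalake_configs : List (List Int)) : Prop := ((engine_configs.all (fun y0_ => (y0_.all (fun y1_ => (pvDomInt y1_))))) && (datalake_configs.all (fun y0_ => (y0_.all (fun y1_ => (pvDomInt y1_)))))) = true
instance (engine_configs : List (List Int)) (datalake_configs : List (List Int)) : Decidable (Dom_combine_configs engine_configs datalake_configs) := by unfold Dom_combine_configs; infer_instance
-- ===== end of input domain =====

-- B replaces A's index loop (max_len + per-index bounds checks) by simultaneous consumption of both lists carrying the last element seen on each side (objective: alternative).


-- ===== PORT A =====
def combine_configs (engine_configs : List (List Int)) (datalake_configs : List (List Int)) : List (List Int) :=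
  if engine_configs = [] ∧ datalake_configs = [] then []
  else
    let maxLen := max (if engine_configs ≠ [] then engine_configs.length else 0)
                      (if datalake_configs ≠ [] then datalake_configs.length else 0)
    (List.range maxLen).foldl (fun acc i =>
      let engine_config :=
        if engine_configs ≠ [] then
          if i < engine_configs.length then engine_configs.getD i []
          else engine_configs.getLast!   -- engine_configs[-1], list nonempty here
        else []
      let datalake_config :=
        if datalake_configs ≠ [] then
          if i < datalake_configs.length then datalake_configs.getD i []
          else datalake_configs.getLast!
        else []
      acc ++ [engine_config ++ datalake_config]) []

-- ===== PORT B =====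
-- Source B's while loop: consume both lists from the front (es/ds are reversed copies
-- popped from the back = the front of the originals), carrying e, d.
def pvGo (es ds : List (List Int)) (e d : List Int) : List (List Int) :=
  match es, ds with
  | [], [] => []
  | x :: xs, y :: ys => (x ++ y) :: pvGo xs ys x y
  | x :: xs, [] => (x ++ d) :: pvGo xs [] x d
  | [], y :: ys => (e ++ y) :: pvGo [] ys e y

def combine_configs_alt (engine_configs : List (List Int)) (datalake_configs : List (List Int)) : List (List Int) :=
  pvGo engine_configs datalake_configs [] []

-- ===== PRECONDITION & SPEC =====
def Spec_combine_configs (engine_configs : List (List Int)) (datalake_configs : List (List Int)) (out : List (List Int)) : Prop := out = combine_configs_alt engine_configs datalake_configs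
instance (engine_configs : List (List Int)) (datalake_configs : List (List Int)) (out : List (List Int)) : Decidable (Spec_combine_configs engine_configs datalake_configs out) := by unfold Spec_combine_configs; infer_instance

-- ===== CLAIM (what is proved, stated in full; the proofs are below) =====
def Claim_equal_combine_configs : Prop := ∀ (engine_configs : List (List Int)) (datalake_configs : List (List Int)), Dom_combine_configs engine_configs datalake_configs → Spec_combine_configs engine_configs datalake_configs (combine_configs engine_configs datalake_configs)

-- ===== LEMMAS AND PROOFS =====

-- A's append-accumulator loop over range n is the map over range n.
theorem pv_foldl_range_append {α : Type} (n : Nat) (h : Nat → α) (acc : List α) :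
    (List.range n).foldl (fun a i => a ++ [h i]) acc = acc ++ (List.range n).map h := by
  induction n generalizing acc with
  | zero => simp
  | succ k ih => simp [List.range_succ, ih]

-- index-wise reading of B: element i is xs[i] if in range, else the carried/last value.
def pvPick (xs : List (List Int)) (last : List Int) (i : Nat) : List Int :=
  xs.getD i (xs.getLastD last)

theorem pvPick_cons (x : List Int) (xs : List (List Int)) (l : List Int) (i : Nat) :
    pvPick (x :: xs) l (i + 1) = pvPick xs x i := by
  unfold pvPick
  by_cases h : i < xs.length
  · rw [List.getD_eq_getElem _ _ (by simp [Nat.succ_lt_succ h]),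
      List.getD_eq_getElem _ _ h]
    simp
  · rw [List.getD_eq_default _ _ (by simp; omega), List.getD_eq_default _ _ (by omega)]
    exact List.getLastD_cons ..

theorem pv_go_eq_map (es : List (List Int)) : ∀ (ds : List (List Int)) (le ld : List Int),
    pvGo es ds le ld
      = (List.range (max es.length ds.length)).map
          (fun i => pvPick es le i ++ pvPick ds ld i) := by
  induction es with
  | nil =>
    intro ds
    induction ds with
    | nil => intro le ld; simp [pvGo]
    | cons y ys ihd =>
      intro le ld
      simp only [pvGo, ihd]
      rw [show max ([] : List (List Int)).length (y :: ys).length = ys.length + 1 by simp]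
      rw [List.range_succ_eq_map, List.map_cons, List.map_map]
      congr 1
      simp only [List.length_nil, Nat.zero_max]
      apply List.map_congr_left
      intro i _
      simp only [Function.comp_apply, Nat.succ_eq_add_one, pvPick_cons]
      simp [pvPick]
  | cons x xs ihe =>
    intro ds le ld
    cases ds with
    | nil =>
      simp only [pvGo, ihe]
      rw [show max (x :: xs).length ([] : List (List Int)).length = xs.length + 1 by simp]
      rw [List.range_succ_eq_map, List.map_cons, List.map_map]
      congr 1
      simp only [List.length_nil, Nat.max_zero]
      apply List.map_congr_left
      intro i _
      simp only [Function.comp_apply, Nat.succ_eq_add_one, pvPick_cons]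
      simp [pvPick]
    | cons y ys =>
      simp only [pvGo, ihe]
      rw [show max (x :: xs).length (y :: ys).length = max xs.length ys.length + 1 by
        simp [Nat.succ_max_succ]]
      rw [List.range_succ_eq_map, List.map_cons, List.map_map]
      congr 1
      apply List.map_congr_left
      intro i _
      simp only [Function.comp_apply, Nat.succ_eq_add_one, pvPick_cons]

-- A's per-index branching equals pvPick with carry [].
theorem pv_pick_of_branch (xs : List (List Int)) (i : Nat) :
    (if xs ≠ [] then
       if i < xs.length then xs.getD i [] else xs.getLast!
     else []) = pvPick xs [] i := by
  by_cases hc : xs = []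
  · simp [hc, pvPick]
  · simp only [hc, ne_eq, not_false_eq_true, if_true, pvPick]
    by_cases hlt : i < xs.length
    · simp [hlt, List.getD]
    · rw [if_neg hlt, List.getD_eq_default _ _ (by omega)]
      cases xs with
      | nil => simp at hc
      | cons z zs => simp [show (default : List Int) = [] from rfl]

-- ===== VERDICT (by name: the statement is the Claim_ definition above) =====
theorem combine_configs_spec : Claim_equal_combine_configs := by
  intro e d _
  unfold Spec_combine_configs combine_configs combine_configs_alt
  by_cases hboth : e = [] ∧ d = []
  · simp [hboth.1, hboth.2, pvGo]
  · rw [if_neg hboth, pv_foldl_range_append, List.nil_append, pv_go_eq_map]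
    have hm : max (if e ≠ [] then e.length else 0) (if d ≠ [] then d.length else 0)
        = max e.length d.length := by
      by_cases hc : e = [] <;> by_cases hc' : d = [] <;> simp [hc, hc']
    rw [hm]
    apply List.map_congr_left
    intro i _
    rw [pv_pick_of_branch e i, pv_pick_of_branch d i]
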